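-- pv_equiv track=rewrite | github.com/frankrunfola-developer/family-tree-got | app.py | family_stats
-- ===== SOURCE A (Python) =====
-- from collections import defaultdict
--
-- def family_stats(data: dict) -> dict:
--     people = data.get('people', [])
--     relationships = data.get('relationships', [])
--     spouses = [r for r in relationships if r.get('type') == 'spouse']
--     parent_links = [r for r in relationships if r.get('child') and r.get('parent')]
--
--     generations = 0
--     by_parents = defaultdict(set)
--     for rel in parent_links:
--         by_parents[rel['child']].add(rel['parent'])
--
--     memo: dict[str, int] = {}
--
--     def generation(person_id: str) -> int:
--         if person_id in memo:
--             return memo[person_id]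
--         parents = list(by_parents.get(person_id, set()))
--         if not parents:
--             memo[person_id] = 0
--             return 0
--         memo[person_id] = max(generation(parent_id) for parent_id in parents) + 1
--         return memo[person_id]
--
--     for person in people:
--         generations = max(generations, generation(person['id']))
--
--     return {
--         'members': len(people),
--         'relationships': len(parent_links),
--         'couples': len(spouses),
--         'generations': generations + 1 if people else 0,
--     }
-- ===== SOURCE B (Python) =====
-- def family_stats(data: dict) -> dict:
--     people = data.get('people', [])
--     relationships = data.get('relationships', [])
--     couples = sum(1 for r in relationships if r.get('type') == 'spouse')
--     edges = [(r['child'], r['parent']) for r in relationships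
--              if r.get('child') and r.get('parent')]
--     # longest-path by Bellman-Ford style relaxation: no recursion, no memo
--     depth = {c: 0 for c, _ in edges}
--     for _ in range(len(edges)):
--         for c, p in edges:
--             d = depth.get(p, 0) + 1
--             if d > depth[c]:
--                 depth[c] = d
--     if people:
--         generations = 1 + max(depth.get(person['id'], 0) for person in people)
--     else:
--         generations = 0
--     return {'members': len(people), 'relationships': len(edges),
--             'couples': couples, 'generations': generations}
-- ===== Notes on version B (the rewrite author's own statement) =====
-- stated objective: alternative
-- what changed: Replaces the memoized recursive DFS over parent links by an iterative Bellman-Ford-style longest-path relaxation over the edge list (no recursion, no memo dictionary), keeping the trivial counts; couples is a single counting pass instead of building an intermediate list.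
import Mathlib
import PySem

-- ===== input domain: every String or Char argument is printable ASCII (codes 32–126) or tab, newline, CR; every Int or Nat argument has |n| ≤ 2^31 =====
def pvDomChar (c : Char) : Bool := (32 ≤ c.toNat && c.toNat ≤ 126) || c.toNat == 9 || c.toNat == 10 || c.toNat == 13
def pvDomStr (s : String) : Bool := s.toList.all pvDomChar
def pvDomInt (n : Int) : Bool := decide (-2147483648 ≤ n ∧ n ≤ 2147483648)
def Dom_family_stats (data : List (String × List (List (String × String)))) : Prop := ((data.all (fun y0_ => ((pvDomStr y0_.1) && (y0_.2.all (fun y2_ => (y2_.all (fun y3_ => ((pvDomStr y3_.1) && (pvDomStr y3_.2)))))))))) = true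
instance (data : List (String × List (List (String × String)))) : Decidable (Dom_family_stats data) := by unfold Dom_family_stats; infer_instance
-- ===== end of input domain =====

-- B replaces A's memoized recursive DFS over parent links by an iterative longest-path
-- relaxation over the edge list (objective: alternative, same values, no recursion).

-- shared small helpers (Python expressions used identically by both programs)
def pvTruthy : Option String → Bool
  | some s => s != ""
  | none => false

def pvIdOf (person : List (String × String)) : String := ((PySem.Dict.mk person).get? "id").getD ""
def pvChildOf (r : List (String × String)) : String := ((PySem.Dict.mk r).get? "child").getD ""
def pvParentOf (r : List (String × String)) : String := ((PySem.Dict.mk r).get? "parent").getD ""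
def pvIsLink (r : List (String × String)) : Bool :=
  pvTruthy ((PySem.Dict.mk r).get? "child") && pvTruthy ((PySem.Dict.mk r).get? "parent")
def pvIsSpouse (r : List (String × String)) : Bool := (PySem.Dict.mk r).get? "type" == some "spouse"

-- ===== PORT A =====
-- A's inner 'generation' recursion, with fuel as a totalization device only
-- (under Pre_ the fuel is never exhausted; Python raises RecursionError exactly
-- on the inputs Pre_ excludes).
def pvGenFuel (bp : PySem.Dict String (PySem.Set String)) :
    Nat → PySem.Dict String Int → String → PySem.Dict String Int × Int
  | 0, m, _ => (m, 0)
  | f+1, m, x =>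
    match m.get? x with
    | some v => (m, v)
    | none =>
      let parents : List String := PySem.Dict.getD bp x PySem.Set.empty
      if parents.isEmpty then (m.insert x 0, 0)
      else
        let st := parents.foldl (fun (acc : PySem.Dict String Int × List Int) p =>
            let r := pvGenFuel bp f acc.1 p
            (r.1, acc.2 ++ [r.2])) (m, [])
        let v := st.2.foldl max (st.2.headD 0) + 1
        (st.1.insert x v, v)

def family_stats (data : List (String × List (List (String × String)))) : List (String × Int) :=
  let people := (PySem.Dict.mk data).getD "people" []
  let relationships := (PySem.Dict.mk data).getD "relationships" []
  let spouses := relationships.filter pvIsSpouse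
  let parent_links := relationships.filter pvIsLink
  let by_parents := parent_links.foldl (fun bp rel =>
      PySem.Dict.insert bp (pvChildOf rel)
        (PySem.Set.add (PySem.Dict.getD bp (pvChildOf rel) PySem.Set.empty) (pvParentOf rel)))
    PySem.Dict.empty
  let st := people.foldl (fun (acc : PySem.Dict String Int × Int) person =>
      let r := pvGenFuel by_parents (parent_links.length + 2) acc.1 (pvIdOf person)
      (r.1, max acc.2 r.2)) (PySem.Dict.empty, (0 : Int))
  [("members", (people.length : Int)), ("relationships", (parent_links.length : Int)),
   ("couples", (spouses.length : Int)),
   ("generations", if people.isEmpty then 0 else st.2 + 1)]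

-- ===== PORT B =====
def pvEdges (rels : List (List (String × String))) : List (String × String) :=
  rels.filterMap (fun r => if pvIsLink r then some (pvChildOf r, pvParentOf r) else none)

def pvRelaxEdge (d : PySem.Dict String Int) (e : String × String) : PySem.Dict String Int :=
  let v := PySem.Dict.getD d e.2 0 + 1
  if PySem.Dict.getD d e.1 0 < v then d.insert e.1 v else d

def family_stats_alt (data : List (String × List (List (String × String)))) : List (String × Int) :=
  let people := (PySem.Dict.mk data).getD "people" []
  let relationships := (PySem.Dict.mk data).getD "relationships" []
  let couples := relationships.foldl (fun (n : Int) r => if pvIsSpouse r then n + 1 else n) 0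
  let edges := pvEdges relationships
  let d0 := edges.foldl (fun d e => PySem.Dict.insert d e.1 (0 : Int)) PySem.Dict.empty
  let depth := (List.range edges.length).foldl (fun d _ => edges.foldl pvRelaxEdge d) d0
  let generations : Int :=
    if people.isEmpty then 0
    else
      let vs := people.map (fun person => PySem.Dict.getD depth (pvIdOf person) 0)
      1 + vs.foldl max (vs.headD 0)
  [("members", (people.length : Int)), ("relationships", (edges.length : Int)),
   ("couples", couples), ("generations", generations)]

-- ===== PRECONDITION & SPEC =====
-- breadth-first parent frontier, used only to STATE acyclicity below
def pvStep (E : List (String × String)) (s : List String) : List String :=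
  ((E.filter (fun e => s.contains e.1)).map (fun e => e.2)).dedup

def pvFront (E : List (String × String)) (x : String) : Nat → List String
  | 0 => [x]
  | k+1 => pvStep E (pvFront E x k)

-- "no chain of parent links of length |E|+1 starts at x" = no cycle reachable from x
def pvGood (E : List (String × String)) (x : String) : Bool :=
  pvFront E x (E.length + 1) == []

-- Pre_ excludes exactly the inputs on which Python A raises: a person dict without an
-- 'id' key (KeyError), or a person whose id can reach a cycle of parent links
-- (unbounded recursion: RecursionError).
def Pre_family_stats (data : List (String × List (List (String × String)))) : Prop :=
  ∀ person ∈ (PySem.Dict.mk data).getD "people" [],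
    ((PySem.Dict.mk person).get? "id").isSome = true ∧
    pvGood (pvEdges ((PySem.Dict.mk data).getD "relationships" [])) (pvIdOf person) = true
instance (data : List (String × List (List (String × String)))) : Decidable (Pre_family_stats data) := by
  unfold Pre_family_stats; infer_instance

def pvWitness_family_stats : (List (String × List (List (String × String)))) :=
  [("people", [[("id", "a")], [("id", "c")]]),
   ("relationships", [[("type", "spouse")], [("child", "a"), ("parent", "b")]])]

def Spec_family_stats (data : List (String × List (List (String × String)))) (out : List (String × Int)) : Prop := out = family_stats_alt data
instance (data : List (String × List (List (String × String)))) (out : List (String × Int)) : Decidable (Spec_family_stats data out) := by unfold Spec_family_stats; infer_instance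

-- ===== CLAIM (what is proved, stated in full; the proofs are below) =====
def Claim_equal_family_stats : Prop := ∀ (data : List (String × List (List (String × String)))), Dom_family_stats data → Pre_family_stats data → Spec_family_stats data (family_stats data)
-- ===== LEMMAS AND PROOFS =====

-- proof-side graph notions: parents list, bounded height, chains of parent links
def pvSuccs (E : List (String × String)) (x : String) : List String :=
  (E.filter (fun e => e.1 == x)).map (fun e => e.2)

def pvHB (E : List (String × String)) : Nat → String → Nat
  | 0, _ => 0
  | k+1, x => if pvSuccs E x = [] then 0 else ((pvSuccs E x).map (pvHB E k)).foldl max 0 + 1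

def pvHgt (E : List (String × String)) (x : String) : Nat := pvHB E E.length x

def pvChain (E : List (String × String)) : Nat → String → String → Prop
  | 0, x, b => b = x
  | k+1, x, b => ∃ p, (x, p) ∈ E ∧ pvChain E k p b

def pvMemoOK (E : List (String × String)) (m : PySem.Dict String Int) : Prop :=
  ∀ k v, m.get? k = some v → pvGood E k = true ∧ v = (pvHgt E k : Int)

theorem pvHB_succ (E : List (String × String)) (k : Nat) (x : String) :
    pvHB E (k+1) x = if pvSuccs E x = [] then 0
      else ((pvSuccs E x).map (pvHB E k)).foldl max 0 + 1 := rfl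

theorem pv_mem_succs (E : List (String × String)) (x p : String) :
    p ∈ pvSuccs E x ↔ (x, p) ∈ E := by
  simp only [pvSuccs, List.mem_map, List.mem_filter, beq_iff_eq]
  constructor
  · rintro ⟨⟨a, c⟩, ⟨hE, rfl⟩, rfl⟩; exact hE
  · intro h; exact ⟨(x, p), ⟨h, rfl⟩, rfl⟩

theorem pv_chain_snoc (E : List (String × String)) (k : Nat) (x b : String) :
    pvChain E (k+1) x b ↔ ∃ a, pvChain E k x a ∧ (a, b) ∈ E := by
  induction k generalizing x with
  | zero => simp [pvChain, eq_comm]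
  | succ k ih =>
    constructor
    · rintro ⟨p, hp, hc⟩
      obtain ⟨a, hca, hab⟩ := (ih p).mp hc
      exact ⟨a, ⟨p, hp, hca⟩, hab⟩
    · rintro ⟨a, ⟨p, hp, hca⟩, hab⟩
      exact ⟨p, hp, (ih p).mpr ⟨a, hca, hab⟩⟩

theorem pv_mem_front (E : List (String × String)) (x b : String) (k : Nat) :
    b ∈ pvFront E x k ↔ pvChain E k x b := by
  induction k generalizing b with
  | zero => simp [pvFront, pvChain]
  | succ k ih =>
    rw [pv_chain_snoc]
    simp only [pvFront, pvStep, List.mem_dedup, List.mem_map, List.mem_filter]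
    constructor
    · rintro ⟨⟨a, c⟩, ⟨hE, hmem⟩, rfl⟩
      simp only [List.contains_eq_mem, decide_eq_true_eq] at hmem
      exact ⟨a, (ih a).mp hmem, hE⟩
    · rintro ⟨a, hca, hab⟩
      exact ⟨(a, b), ⟨hab, by simpa using (ih a).mpr hca⟩, rfl⟩

theorem pv_front_succ_nil (E : List (String × String)) (x : String) (k : Nat)
    (h : pvFront E x k = []) : pvFront E x (k+1) = [] := by
  simp [pvFront, pvStep, h]

theorem pv_good_chain_le (E : List (String × String)) (x b : String) (k : Nat)
    (hg : pvGood E x = true) (hc : pvChain E k x b) : k ≤ E.length := by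
  by_contra hk
  have hnil : ∀ j, pvFront E x (E.length + 1 + j) = [] := by
    intro j
    induction j with
    | zero => simpa [pvGood] using hg
    | succ j ihj => exact pv_front_succ_nil E x _ ihj
  have : b ∈ pvFront E x k := (pv_mem_front E x b k).mpr hc
  rw [show k = E.length + 1 + (k - (E.length + 1)) by omega, hnil] at this
  exact absurd this (List.not_mem_nil)

theorem pv_good_edge (E : List (String × String)) (x p : String)
    (hg : pvGood E x = true) (he : (x, p) ∈ E) : pvGood E p = true := by
  rw [pvGood, beq_iff_eq]
  by_contra hne
  obtain ⟨b, hb⟩ := List.exists_mem_of_ne_nil _ hne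
  have hc : pvChain E (E.length + 1) p b := (pv_mem_front E p b _).mp hb
  have : pvChain E (E.length + 1 + 1) x b := ⟨p, he, hc⟩
  have := pv_good_chain_le E x b _ hg this
  omega

theorem pv_foldl_max_le {l : List Nat} {b i : Nat} (hi : i ≤ b) (h : ∀ a ∈ l, a ≤ b) :
    l.foldl max i ≤ b := by
  induction l generalizing i with
  | nil => simpa
  | cons a t ih =>
    simp only [List.foldl_cons]
    exact ih (by have := h a (by simp); omega) (fun a ha => h a (by simp [ha]))

theorem pv_hb_mono (E : List (String × String)) (k k' : Nat) (x : String) (h : k ≤ k') :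
    pvHB E k x ≤ pvHB E k' x := by
  have step : ∀ (k : Nat) (x : String), pvHB E k x ≤ pvHB E (k+1) x := by
    intro k
    induction k with
    | zero => intro x; simp [pvHB]
    | succ k ih =>
      intro x
      rw [pvHB_succ, pvHB_succ]
      split
      · omega
      · have : ((pvSuccs E x).map (pvHB E k)).foldl max 0 ≤
            ((pvSuccs E x).map (pvHB E (k+1))).foldl max 0 := by
          apply pv_foldl_max_le (Nat.zero_le _)
          intro a ha
          obtain ⟨p, hp, rfl⟩ := List.mem_map.mp ha
          exact le_trans (ih p)
            ((PySem.List.le_foldl_max _ 0).2 _ (List.mem_map.mpr ⟨p, hp, rfl⟩))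
        omega
  induction k', h using Nat.le_induction with
  | base => exact le_rfl
  | succ n hn ih => exact le_trans ih (step n x)

theorem pv_hb_realized (E : List (String × String)) (k : Nat) (x : String) :
    ∃ b, pvChain E (pvHB E k x) x b := by
  induction k generalizing x with
  | zero => exact ⟨x, rfl⟩
  | succ k ih =>
    rw [pvHB_succ]
    split
    · exact ⟨x, rfl⟩
    · rename_i hs
      rcases PySem.List.foldl_max_mem ((pvSuccs E x).map (pvHB E k)) 0 with h0 | hmem
      · rw [h0]
        obtain ⟨p, hp⟩ := List.exists_mem_of_ne_nil _ hs
        exact ⟨p, p, (pv_mem_succs E x p).mp hp, rfl⟩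
      · obtain ⟨p, hp, hfold⟩ := List.mem_map.mp hmem
        obtain ⟨b, hb⟩ := ih p
        rw [hfold] at hb
        exact ⟨b, p, (pv_mem_succs E x p).mp hp, hb⟩

theorem pv_chain_le_hb (E : List (String × String)) (n k : Nat) (x b : String)
    (hc : pvChain E n x b) (hk : n ≤ k) : n ≤ pvHB E k x := by
  induction n generalizing x k with
  | zero => omega
  | succ n ih =>
    obtain ⟨p, hp, hcp⟩ := hc
    obtain ⟨m, rfl⟩ : ∃ m, k = m + 1 := ⟨k - 1, by omega⟩
    have hps : p ∈ pvSuccs E x := (pv_mem_succs E x p).mpr hp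
    have h1 : n ≤ pvHB E m p := ih m p hcp (by omega)
    have h2 : pvHB E m p ≤ ((pvSuccs E x).map (pvHB E m)).foldl max 0 :=
      (PySem.List.le_foldl_max _ 0).2 _ (List.mem_map.mpr ⟨p, hps, rfl⟩)
    have hs : ¬ (pvSuccs E x = []) := by
      intro h; rw [h] at hps; exact absurd hps (List.not_mem_nil)
    rw [pvHB_succ, if_neg hs]
    omega

theorem pv_good_hb_le (E : List (String × String)) (k : Nat) (x : String)
    (hg : pvGood E x = true) : pvHB E k x ≤ E.length := by
  obtain ⟨b, hb⟩ := pv_hb_realized E k x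
  exact pv_good_chain_le E x b _ hg hb

theorem pv_stab (E : List (String × String)) (k : Nat) (x : String)
    (hg : pvGood E x = true) (hk : E.length ≤ k) : pvHB E k x = pvHgt E x := by
  refine le_antisymm ?_ (pv_hb_mono E _ _ x hk)
  obtain ⟨b, hb⟩ := pv_hb_realized E k x
  exact pv_chain_le_hb E _ _ x b hb (pv_good_hb_le E k x hg)

theorem pv_hgt_fix (E : List (String × String)) (x : String) (hg : pvGood E x = true) :
    pvHgt E x = if pvSuccs E x = [] then 0
                else ((pvSuccs E x).map (pvHgt E)).foldl max 0 + 1 := by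
  have h1 : pvHgt E x = pvHB E (E.length + 1) x :=
    (pv_stab E (E.length + 1) x hg (by omega)).symm
  rw [h1, pvHB_succ]
  rfl

theorem pv_good_parent_lt (E : List (String × String)) (x p : String)
    (hg : pvGood E x = true) (he : (x, p) ∈ E) : pvHgt E p < pvHgt E x := by
  have hps : p ∈ pvSuccs E x := (pv_mem_succs E x p).mpr he
  have hs : ¬ (pvSuccs E x = []) := by
    intro h; rw [h] at hps; exact absurd hps (List.not_mem_nil)
  rw [pv_hgt_fix E x hg, if_neg hs]
  have := (PySem.List.le_foldl_max ((pvSuccs E x).map (pvHgt E)) 0).2 _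
    (List.mem_map.mpr ⟨p, hps, rfl⟩)
  omega

theorem pv_foldl_max_eq_of_mem (l1 l2 : List String) (f : String → Nat)
    (h : ∀ a, a ∈ l1 ↔ a ∈ l2) :
    (l1.map f).foldl max 0 = (l2.map f).foldl max 0 := by
  apply le_antisymm
  · apply pv_foldl_max_le (Nat.zero_le _)
    intro a ha
    obtain ⟨p, hp, rfl⟩ := List.mem_map.mp ha
    exact (PySem.List.le_foldl_max _ 0).2 _ (List.mem_map.mpr ⟨p, (h p).mp hp, rfl⟩)
  · apply pv_foldl_max_le (Nat.zero_le _)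
    intro a ha
    obtain ⟨p, hp, rfl⟩ := List.mem_map.mp ha
    exact (PySem.List.le_foldl_max _ 0).2 _ (List.mem_map.mpr ⟨p, (h p).mpr hp, rfl⟩)

theorem pv_foldl_max_cast (t : List Nat) (i : Nat) :
    (t.map (fun n => Int.ofNat n)).foldl max (Int.ofNat i) = Int.ofNat (t.foldl max i) := by
  induction t generalizing i with
  | nil => simp
  | cons a t ih =>
    rw [List.map_cons, List.foldl_cons, List.foldl_cons]
    rw [show max (Int.ofNat i) (Int.ofNat a) = Int.ofNat (max i a) by
      simp [Int.ofNat_eq_natCast, Nat.cast_max]]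
    exact ih (max i a)

theorem pv_cast_fold_headD (l : List Nat) (hne : l ≠ []) :
    (l.map (fun n => Int.ofNat n)).foldl max ((l.map (fun n => Int.ofNat n)).headD 0)
      = Int.ofNat (l.foldl max 0) := by
  obtain ⟨a, t, rfl⟩ : ∃ a t, l = a :: t := by
    cases l with
    | nil => exact absurd rfl hne
    | cons a t => exact ⟨a, t, rfl⟩
  rw [List.map_cons, List.headD_cons, List.foldl_cons, List.foldl_cons, max_self,
    Nat.zero_max, pv_foldl_max_cast]

-- the edge list is the mapped filtered link list
theorem pv_edges_eq (rels : List (List (String × String))) :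
    pvEdges rels = (rels.filter pvIsLink).map (fun r => (pvChildOf r, pvParentOf r)) := by
  induction rels with
  | nil => rfl
  | cons r t ih =>
    by_cases h : pvIsLink r = true
    · simp [pvEdges, List.filterMap_cons, List.filter_cons, h] at *
      exact ih
    · simp [pvEdges, List.filterMap_cons, List.filter_cons, h] at *
      exact ih

-- A's by_parents dictionary holds exactly the edge relation
theorem pv_bp_getD (links : List (List (String × String))) (bp0 : PySem.Dict String (PySem.Set String))
    (x p : String) :
    (p ∈ PySem.Dict.getD (links.foldl (fun bp rel =>
        PySem.Dict.insert bp (pvChildOf rel)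
          (PySem.Set.add (PySem.Dict.getD bp (pvChildOf rel) PySem.Set.empty) (pvParentOf rel))) bp0) x PySem.Set.empty)
    ↔ (p ∈ PySem.Dict.getD bp0 x PySem.Set.empty ∨ ∃ r ∈ links, pvChildOf r = x ∧ pvParentOf r = p) := by
  induction links generalizing bp0 with
  | nil => simp
  | cons r t ih =>
    rw [List.foldl_cons, ih]
    rw [PySem.Dict.getD_insert]
    by_cases hx : x = pvChildOf r
    · rw [if_pos hx, hx]
      simp only [PySem.Set.mem_add, List.mem_cons]
      constructor
      · rintro (h | h)
        · rcases h with h | h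
          · exact Or.inl h
          · exact Or.inr ⟨r, Or.inl rfl, rfl, h.symm⟩
        · obtain ⟨r', hr', h1, h2⟩ := h
          exact Or.inr ⟨r', Or.inr hr', h1, h2⟩
      · rintro (h | ⟨r', hr', h1, h2⟩)
        · exact Or.inl (Or.inl h)
        · rcases hr' with rfl | hr'
          · exact Or.inl (Or.inr h2.symm)
          · exact Or.inr ⟨r', hr', h1, h2⟩
    · rw [if_neg hx]
      constructor
      · rintro (h | ⟨r', hr', h1, h2⟩)
        · exact Or.inl h
        · exact Or.inr ⟨r', List.mem_cons_of_mem _ hr', h1, h2⟩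
      · rintro (h | ⟨r', hr', h1, h2⟩)
        · exact Or.inl h
        · rcases List.mem_cons.mp hr' with rfl | hr'
          · exact absurd h1.symm hx
          · exact Or.inr ⟨r', hr', h1, h2⟩

-- A's recursion computes pvHgt and preserves the memo invariant
theorem pv_genA (E : List (String × String)) (bp : PySem.Dict String (PySem.Set String))
    (hbp : ∀ x p, p ∈ PySem.Dict.getD bp x PySem.Set.empty ↔ (x, p) ∈ E) :
    ∀ f (x : String) (m : PySem.Dict String Int), pvMemoOK E m → pvGood E x = true →
      pvHgt E x + 1 ≤ f →
      (pvGenFuel bp f m x).2 = (pvHgt E x : Int) ∧ pvMemoOK E (pvGenFuel bp f m x).1 := by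
  intro f
  induction f with
  | zero => intro x m hm hg hf; omega
  | succ f ih =>
    intro x m hm hg hf
    cases hmx : m.get? x with
    | some v =>
      obtain ⟨_, hv⟩ := hm x v hmx
      simp only [pvGenFuel, hmx]
      exact ⟨hv, hm⟩
    | none =>
      simp only [pvGenFuel, hmx]
      have hmem : ∀ q, q ∈ PySem.Dict.getD bp x PySem.Set.empty ↔ (x, q) ∈ E :=
        fun q => hbp x q
      by_cases hempty : (PySem.Dict.getD bp x PySem.Set.empty : List String).isEmpty
      · have hsucc : pvSuccs E x = [] := by
          rw [List.eq_nil_iff_forall_not_mem]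
          intro q hq
          have hqE := (pv_mem_succs E x q).mp hq
          have hqin := (hmem q).mpr hqE
          rw [List.isEmpty_iff] at hempty
          rw [hempty] at hqin
          exact absurd hqin (List.not_mem_nil)
        have h0 : pvHgt E x = 0 := by rw [pv_hgt_fix E x hg, if_pos hsucc]
        rw [if_pos hempty]
        refine ⟨by simp [h0], ?_⟩
        intro k v hk
        rw [PySem.Dict.get?_insert] at hk
        split at hk
        · rename_i hkx
          subst hkx
          cases hk
          exact ⟨hg, by simp [h0]⟩
        · exact hm k v hk
      · rw [if_neg hempty]
        have hxle : pvHgt E x ≤ f := by omega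
        have hfold : ∀ (qs : List String), (∀ q ∈ qs, (x, q) ∈ E) →
            ∀ (m1 : PySem.Dict String Int) (acc : List Int), pvMemoOK E m1 →
            (qs.foldl (fun (acc : PySem.Dict String Int × List Int) p =>
               ((pvGenFuel bp f acc.1 p).1, acc.2 ++ [(pvGenFuel bp f acc.1 p).2])) (m1, acc)).2
              = acc ++ qs.map (fun q => Int.ofNat (pvHgt E q)) ∧
            pvMemoOK E
              ((qs.foldl (fun (acc : PySem.Dict String Int × List Int) p =>
               ((pvGenFuel bp f acc.1 p).1, acc.2 ++ [(pvGenFuel bp f acc.1 p).2])) (m1, acc)).1) := by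
          intro qs
          induction qs with
          | nil => intro _ m1 acc hm1; simp [hm1]
          | cons q qs' ihq =>
            intro hqs m1 acc hm1
            have hqE : (x, q) ∈ E := hqs q (List.mem_cons_self)
            have hgq : pvGood E q = true := pv_good_edge E x q hg hqE
            have hltq : pvHgt E q < pvHgt E x := pv_good_parent_lt E x q hg hqE
            obtain ⟨h2, hmok⟩ := ih q m1 hm1 hgq (by omega)
            rw [List.foldl_cons, h2]
            obtain ⟨ha, hb⟩ := ihq (fun q' hq' => hqs q' (List.mem_cons_of_mem _ hq'))
              (pvGenFuel bp f m1 q).1 (acc ++ [(pvHgt E q : Int)]) hmok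
            refine ⟨?_, hb⟩
            rw [ha]
            simp [Int.ofNat_eq_natCast]
        obtain ⟨hst2, hstok⟩ := hfold (PySem.Dict.getD bp x PySem.Set.empty)
          (fun q hq => (hmem q).mp hq) m [] hm
        have hpsne : (PySem.Dict.getD bp x PySem.Set.empty : List String) ≠ [] := by
          intro h; rw [h] at hempty; exact hempty (by simp)
        have hsucc : pvSuccs E x ≠ [] := by
          intro h
          obtain ⟨q, hq⟩ := List.exists_mem_of_ne_nil _ hpsne
          have := (pv_mem_succs E x q).mpr ((hmem q).mp hq)
          rw [h] at this
          exact absurd this (List.not_mem_nil)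
        set ps : List String := (PySem.Dict.getD bp x PySem.Set.empty : List String) with hps
        have hmax : (ps.map (fun q => Int.ofNat (pvHgt E q))).foldl max
              ((ps.map (fun q => Int.ofNat (pvHgt E q))).headD 0)
            = Int.ofNat (((pvSuccs E x).map (pvHgt E)).foldl max 0) := by
          have hmm : ∀ a, a ∈ ps ↔ a ∈ pvSuccs E x := by
            intro a
            rw [hmem a, pv_mem_succs]
          rw [show ps.map (fun q => Int.ofNat (pvHgt E q))
                = (ps.map (pvHgt E)).map (fun n => Int.ofNat n) by rw [List.map_map]; rfl]
          rw [pv_cast_fold_headD _ (by simpa using hpsne)]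
          rw [pv_foldl_max_eq_of_mem ps (pvSuccs E x) (pvHgt E) hmm]
        have hfix : pvHgt E x = ((pvSuccs E x).map (pvHgt E)).foldl max 0 + 1 := by
          rw [pv_hgt_fix E x hg, if_neg hsucc]
        rw [hst2]
        simp only [List.nil_append]
        constructor
        · rw [hmax, hfix]
          simp [Int.ofNat_eq_natCast]
        · intro k v hk
          rw [PySem.Dict.get?_insert] at hk
          split at hk
          · rename_i hkx
            subst hkx
            cases hk
            refine ⟨hg, ?_⟩
            rw [hmax, hfix]
            simp [Int.ofNat_eq_natCast]
          · exact hstok k v hk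

-- A's outer loop is the running maximum of the heights of the people's ids
theorem pv_loopA (E : List (String × String)) (bp : PySem.Dict String (PySem.Set String))
    (hbp : ∀ x p, p ∈ PySem.Dict.getD bp x PySem.Set.empty ↔ (x, p) ∈ E) (F : Nat)
    (hF : E.length + 2 ≤ F) :
    ∀ (ppl : List (List (String × String))) (m : PySem.Dict String Int) (g : Nat),
      pvMemoOK E m →
      (∀ person ∈ ppl, pvGood E (pvIdOf person) = true) →
      (ppl.foldl (fun (acc : PySem.Dict String Int × Int) person =>
          ((pvGenFuel bp F acc.1 (pvIdOf person)).1,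
           max acc.2 (pvGenFuel bp F acc.1 (pvIdOf person)).2)) (m, (g : Int))).2
        = ((ppl.foldl (fun (a : Nat) person => max a (pvHgt E (pvIdOf person))) g : Nat) : Int) := by
  intro ppl
  induction ppl with
  | nil => intro m g _ _; simp
  | cons person t ih =>
    intro m g hm hgood
    have hgp : pvGood E (pvIdOf person) = true := hgood person (List.mem_cons_self)
    have hble : pvHgt E (pvIdOf person) ≤ E.length := pv_good_hb_le E E.length _ hgp
    obtain ⟨h2, hmok⟩ := pv_genA E bp hbp F (pvIdOf person) m hm hgp (by omega)
    rw [List.foldl_cons, List.foldl_cons, h2]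
    rw [show max ((g : Int)) ((pvHgt E (pvIdOf person) : Nat) : Int)
          = ((max g (pvHgt E (pvIdOf person)) : Nat) : Int) by push_cast; rfl]
    exact ih _ _ hmok (fun p hp => hgood p (List.mem_cons_of_mem _ hp))
-- B-side: the initial depth dictionary is everywhere 0
theorem pv_d0_getD (E : List (String × String)) (x : String) :
    PySem.Dict.getD (E.foldl (fun d e => PySem.Dict.insert d e.1 (0 : Int)) PySem.Dict.empty) x 0 = 0 := by
  have aux : ∀ (es : List (String × String)) (d : PySem.Dict String Int),
      (∀ y, PySem.Dict.getD d y 0 = 0) →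
      ∀ y, PySem.Dict.getD (es.foldl (fun d e => PySem.Dict.insert d e.1 (0 : Int)) d) y 0 = 0 := by
    intro es
    induction es with
    | nil => intro d hd y; exact hd y
    | cons e t ih =>
      intro d hd y
      rw [List.foldl_cons]
      refine ih _ (fun z => ?_) y
      rw [PySem.Dict.getD_insert]
      split
      · rfl
      · exact hd z
  exact aux E PySem.Dict.empty (fun y => by simp [pysem]) x

theorem pv_relax_mono (d : PySem.Dict String Int) (e : String × String) (y : String) :
    PySem.Dict.getD d y 0 ≤ PySem.Dict.getD (pvRelaxEdge d e) y 0 := by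
  by_cases hlt : PySem.Dict.getD d e.1 0 < PySem.Dict.getD d e.2 0 + 1
  · simp only [pvRelaxEdge, if_pos hlt]
    rw [PySem.Dict.getD_insert]
    split
    · rename_i hy; subst hy; omega
    · exact le_rfl
  · simp only [pvRelaxEdge, if_neg hlt]
    exact le_rfl

theorem pv_relax_fold_mono (es : List (String × String)) (d : PySem.Dict String Int) (y : String) :
    PySem.Dict.getD d y 0 ≤ PySem.Dict.getD (es.foldl pvRelaxEdge d) y 0 := by
  induction es generalizing d with
  | nil => exact le_rfl
  | cons e t ih => exact le_trans (pv_relax_mono d e y) (ih _)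

theorem pv_relax_lower (es : List (String × String)) (d : PySem.Dict String Int) (c p : String)
    (h : (c, p) ∈ es) :
    PySem.Dict.getD d p 0 + 1 ≤ PySem.Dict.getD (es.foldl pvRelaxEdge d) c 0 := by
  induction es generalizing d with
  | nil => cases h
  | cons e t ih =>
    rw [List.foldl_cons]
    rcases List.mem_cons.mp h with he | ht
    · refine le_trans ?_ (pv_relax_fold_mono t _ c)
      rw [← he]
      by_cases hlt : PySem.Dict.getD d c 0 < PySem.Dict.getD d p 0 + 1
      · simp only [pvRelaxEdge, if_pos hlt]
        rw [PySem.Dict.getD_insert, if_pos rfl]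
      · simp only [pvRelaxEdge, if_neg hlt]
        omega
    · exact le_trans (by have := pv_relax_mono d e p; omega) (ih _ ht)

theorem pv_relax_upper (E : List (String × String)) (es : List (String × String))
    (hes : ∀ e ∈ es, e ∈ E) (d : PySem.Dict String Int)
    (hd : ∀ x, pvGood E x = true → PySem.Dict.getD d x 0 ≤ (pvHgt E x : Int)) :
    ∀ x, pvGood E x = true → PySem.Dict.getD (es.foldl pvRelaxEdge d) x 0 ≤ (pvHgt E x : Int) := by
  induction es generalizing d with
  | nil => exact hd
  | cons e t ih =>
    rw [List.foldl_cons]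
    refine ih (fun e' he' => hes e' (List.mem_cons_of_mem _ he')) _ (fun y hy => ?_)
    have heE : (e.1, e.2) ∈ E := by
      have := hes e (List.mem_cons_self)
      simpa using this
    by_cases hlt : PySem.Dict.getD d e.1 0 < PySem.Dict.getD d e.2 0 + 1
    · simp only [pvRelaxEdge, if_pos hlt]
      rw [PySem.Dict.getD_insert]
      split
      · rename_i hy1; subst hy1
        have hgood2 : pvGood E e.2 = true := pv_good_edge E e.1 e.2 hy heE
        have hlt2 : pvHgt E e.2 < pvHgt E e.1 := pv_good_parent_lt E e.1 e.2 hy heE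
        have := hd e.2 hgood2
        push_cast at *
        omega
      · exact hd y hy
    · simp only [pvRelaxEdge, if_neg hlt]
      exact hd y hy

theorem pv_pass_lower (E : List (String × String)) (k : Nat) (d : PySem.Dict String Int)
    (hd : ∀ x, ((pvHB E k x : Nat) : Int) ≤ PySem.Dict.getD d x 0) :
    ∀ x, ((pvHB E (k+1) x : Nat) : Int) ≤ PySem.Dict.getD (E.foldl pvRelaxEdge d) x 0 := by
  intro x
  have hmono := pv_relax_fold_mono E d x
  rw [pvHB_succ]
  split
  · have h1 := hd x
    push_cast at *
    omega
  · rename_i hs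
    rcases PySem.List.foldl_max_mem ((pvSuccs E x).map (pvHB E k)) 0 with h0 | hmem
    · rw [h0]
      obtain ⟨p, hp⟩ := List.exists_mem_of_ne_nil _ hs
      have hE := (pv_mem_succs E x p).mp hp
      have hlow := pv_relax_lower E d x p hE
      have h1 := hd p
      push_cast at *
      omega
    · obtain ⟨p, hp, hfold⟩ := List.mem_map.mp hmem
      have hE := (pv_mem_succs E x p).mp hp
      have hlow := pv_relax_lower E d x p hE
      have h1 := hd p
      rw [← hfold]
      push_cast at *
      omega

-- B's relaxation computes pvHgt on every good node
theorem pv_depth_final (E : List (String × String)) (x : String) (hg : pvGood E x = true) :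
    PySem.Dict.getD ((List.range E.length).foldl (fun d _ => E.foldl pvRelaxEdge d)
      (E.foldl (fun d e => PySem.Dict.insert d e.1 (0 : Int)) PySem.Dict.empty)) x 0
    = (pvHgt E x : Int) := by
  have hup : ∀ n, ∀ y, pvGood E y = true →
      PySem.Dict.getD ((List.range n).foldl (fun d _ => E.foldl pvRelaxEdge d)
        (E.foldl (fun d e => PySem.Dict.insert d e.1 (0 : Int)) PySem.Dict.empty)) y 0
      ≤ (pvHgt E y : Int) := by
    intro n
    induction n with
    | zero =>
      intro y _
      simp only [List.range_zero, List.foldl_nil]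
      rw [pv_d0_getD]
      positivity
    | succ n ih =>
      rw [List.range_succ]
      simp only [List.foldl_append, List.foldl_cons, List.foldl_nil]
      exact pv_relax_upper E E (fun e he => he) _ ih
  have hlow : ∀ n, ∀ y, ((pvHB E n y : Nat) : Int) ≤
      PySem.Dict.getD ((List.range n).foldl (fun d _ => E.foldl pvRelaxEdge d)
        (E.foldl (fun d e => PySem.Dict.insert d e.1 (0 : Int)) PySem.Dict.empty)) y 0 := by
    intro n
    induction n with
    | zero =>
      intro y
      simp only [List.range_zero, List.foldl_nil]
      rw [pv_d0_getD]
      simp [pvHB]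
    | succ n ih =>
      rw [List.range_succ]
      simp only [List.foldl_append, List.foldl_cons, List.foldl_nil]
      exact pv_pass_lower E n _ ih
  exact le_antisymm (hup E.length x hg) (hlow E.length x)

-- ===== VERDICT (by name: the statement is the Claim_ definition above) =====
theorem family_stats_spec : Claim_equal_family_stats := by
  unfold Claim_equal_family_stats Spec_family_stats
  intro data _ hpre
  unfold Pre_family_stats at hpre
  simp only [family_stats, family_stats_alt]
  set people := (PySem.Dict.mk data).getD "people" ([] : List (List (String × String))) with hpeople
  set rels := (PySem.Dict.mk data).getD "relationships" ([] : List (List (String × String))) with hrels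
  have hEeq := pv_edges_eq rels
  have hlen : (rels.filter pvIsLink).length = (pvEdges rels).length := by
    rw [hEeq, List.length_map]
  have hbp : ∀ x p, p ∈ PySem.Dict.getD ((rels.filter pvIsLink).foldl (fun bp rel =>
      PySem.Dict.insert bp (pvChildOf rel)
        (PySem.Set.add (PySem.Dict.getD bp (pvChildOf rel) PySem.Set.empty) (pvParentOf rel)))
      PySem.Dict.empty) x PySem.Set.empty ↔ (x, p) ∈ pvEdges rels := by
    intro x p
    rw [pv_bp_getD, hEeq]
    constructor
    · rintro (h | ⟨r, hr, h1, h2⟩)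
      · rw [show (PySem.Dict.getD PySem.Dict.empty x PySem.Set.empty : List String) = [] from rfl] at h
        exact absurd h (List.not_mem_nil)
      · exact List.mem_map.mpr ⟨r, hr, by rw [h1, h2]⟩
    · intro h
      obtain ⟨r, hr, hr2⟩ := List.mem_map.mp h
      exact Or.inr ⟨r, hr, congrArg Prod.fst hr2, congrArg Prod.snd hr2⟩
  have hcouples : (rels.foldl (fun (n : Int) r => if pvIsSpouse r then n + 1 else n) 0)
      = ((rels.filter pvIsSpouse).length : Int) := by
    rw [PySem.List.foldl_if_add_one]
    simp [List.countP_eq_length_filter]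
  by_cases hpe : people.isEmpty
  · simp [hpe, hlen, hcouples]
  · have hApart := pv_loopA (pvEdges rels) _ hbp ((rels.filter pvIsLink).length + 2)
      (by omega) people PySem.Dict.empty 0
      (fun k v hk => by rw [PySem.Dict.get?_empty] at hk; cases hk)
      (fun person hperson => (hpre person hperson).2)
    norm_cast at hApart
    have hvs : people.map (fun person =>
        PySem.Dict.getD ((List.range (pvEdges rels).length).foldl
            (fun d _ => (pvEdges rels).foldl pvRelaxEdge d)
            ((pvEdges rels).foldl (fun d e => PySem.Dict.insert d e.1 (0 : Int)) PySem.Dict.empty))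
          (pvIdOf person) 0)
        = (people.map (fun person => pvHgt (pvEdges rels) (pvIdOf person))).map
            (fun n => Int.ofNat n) := by
      rw [List.map_map]
      apply List.map_congr_left
      intro person hp
      have := pv_depth_final (pvEdges rels) (pvIdOf person) (hpre person hp).2
      simpa [Int.ofNat_eq_natCast] using this
    have hl_ne : (people.map (fun person => pvHgt (pvEdges rels) (pvIdOf person))) ≠ [] := by
      have : people ≠ [] := by
        intro h
        rw [h] at hpe
        exact hpe rfl
      simp [this]
    have hB := pv_cast_fold_headD
      (people.map (fun person => pvHgt (pvEdges rels) (pvIdOf person))) hl_ne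
    have hfoldmap : ((people.map (fun person => pvHgt (pvEdges rels) (pvIdOf person))).foldl max 0)
        = people.foldl (fun (a : Nat) person => max a (pvHgt (pvEdges rels) (pvIdOf person))) 0 :=
      List.foldl_map
    simp only [hpe, Bool.false_eq_true, if_false]
    rw [hvs, hB, hfoldmap, hApart, hlen, hcouples]
    simp [Int.ofNat_eq_natCast]
    omega
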